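-- pv_equiv track=rewrite | github.com/OpenWaterFoundation/owf-app-geoprocessor-python | geoprocessor/util/string.py | __string_to_dictionary_properlistformat
-- ===== SOURCE A (Python) =====
-- def __string_to_dictionary_properlistformat(string):
--     """
--     A private function to be used in the string_to_dictionary. A dictionary in string format can have a list as an
--     entry value. The entry value list does not have apostrophes around each entry (not in the proper string format for
--     the string_to_list function). This function will convert the dictionary entry value string to proper string format
--     so that the dictionary value can be converted to list format using the string_to_list function.
--
--     Args:
--         string: the string of the dictionary entry value that is meant to be a list
--
--     Returns:
--         output_string: the converted string of the dictionary entry value (input) in proper string format for the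
--         string_to_list function
--
--     Raises:
--         None
--     """
--
--     # Create an empty string. Characters will be added to this string as the function processes the input.
--     output_string = ""
--
--     # Iterate over each character in the input string.
--     for char in string:
--
--         # If the character is an open bracket, append an open bracket and an apostrophe to the output_string.
--         if char == "[":
--             output_string += "['"
--
--         # If the character is a comma, append a comma surrounded by two apostrophes to the output_string.
--         elif char == ',':
--             output_string += "','"
--
--         # If the character is a space, do not append anything to the output_string.
--         elif char == ' ':
--             pass
--
--         # If the character is a closed bracket, append an apostrophe and a closed bracket to the output_string.
--         elif char == ']':
--             output_string += "']"
--
--         # If the character is anything other than the above listed, append that character to the output_string.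
--         else:
--             output_string += char
--
--     # Return the processed output string.
--     return output_string
-- ===== SOURCE B (Python) =====
-- def __string_to_dictionary_properlistformat(string):
--     # Chain of independent full-string passes instead of a char loop with a
--     # branch ladder: drop spaces, then rewrite the three special characters.
--     # The inserted apostrophes are never special, so the order of the passes
--     # cannot interfere.
--     s = string.replace(' ', '')
--     return s.replace('[', "['").replace(',', "','").replace(']', "']")
-- ===== Notes on version B (the rewrite author's own statement) =====
-- stated objective: simpler
-- what changed: Replaces the explicit character loop with a five-branch ladder by a chain of four whole-string str.replace passes (delete spaces, then quote brackets and commas), relying on the inserted apostrophes never matching a later pattern.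
import Mathlib
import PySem

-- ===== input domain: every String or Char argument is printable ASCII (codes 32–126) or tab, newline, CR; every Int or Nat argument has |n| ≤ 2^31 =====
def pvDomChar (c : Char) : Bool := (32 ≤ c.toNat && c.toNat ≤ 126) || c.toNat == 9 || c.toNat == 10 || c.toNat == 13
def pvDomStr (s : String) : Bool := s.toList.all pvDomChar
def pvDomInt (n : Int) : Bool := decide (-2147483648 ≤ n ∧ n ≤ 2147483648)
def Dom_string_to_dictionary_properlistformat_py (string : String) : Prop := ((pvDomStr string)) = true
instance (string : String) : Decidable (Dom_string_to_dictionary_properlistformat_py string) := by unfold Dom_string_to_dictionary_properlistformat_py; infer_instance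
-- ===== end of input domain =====

-- B replaces A's per-character loop and branch ladder by four whole-string replace passes (simpler decomposition).

-- ===== PORT A =====
-- A: loop over the characters, appending per-branch to an accumulator string.
def string_to_dictionary_properlistformat_py (string : String) : String :=
  string.toList.foldl (fun output_string char =>
    if char = '[' then output_string ++ "['"
    else if char = ',' then output_string ++ "','"
    else if char = ' ' then output_string
    else if char = ']' then output_string ++ "']"
    else output_string.push char) ""

-- ===== PORT B =====
-- B: s.replace(' ','').replace('[',"['").replace(',',"','").replace(']',"']")
def string_to_dictionary_properlistformat_py_alt (string : String) : String :=
  PySem.Str.replace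
    (PySem.Str.replace
      (PySem.Str.replace
        (PySem.Str.replace string " " "")
        "[" "['")
      "," "','")
    "]" "']"

-- ===== PRECONDITION & SPEC =====
def Spec_string_to_dictionary_properlistformat_py (string : String) (out : String) : Prop := out = string_to_dictionary_properlistformat_py_alt string
instance (string : String) (out : String) : Decidable (Spec_string_to_dictionary_properlistformat_py string out) := by unfold Spec_string_to_dictionary_properlistformat_py; infer_instance

-- ===== CLAIM (what is proved, stated in full; the proofs are below) =====
def Claim_equal_string_to_dictionary_properlistformat_py : Prop := ∀ (string : String), Dom_string_to_dictionary_properlistformat_py string → Spec_string_to_dictionary_properlistformat_py string (string_to_dictionary_properlistformat_py string)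

-- ===== LEMMAS AND PROOFS =====

theorem pvFlatMap_flatMap {α β γ : Type} (l : List α) (f : α → List β) (g : β → List γ) :
    (l.flatMap f).flatMap g = l.flatMap (fun a => (f a).flatMap g) := by
  induction l with
  | nil => rfl
  | cons a t ih => simp [List.flatMap_cons, ih]

-- the per-character mapping that both programs realise
def pvMapChar (c : Char) : List Char :=
  if c = '[' then ['[', '\'']
  else if c = ',' then ['\'', ',', '\'']
  else if c = ' ' then []
  else if c = ']' then ['\'', ']']
  else [c]

def pvRepl (c0 : Char) (new : List Char) (c : Char) : List Char :=
  if c = c0 then new else [c]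

theorem replace_go_single (c0 : Char) (new : List Char) :
    ∀ (l acc : List Char) (fuel : Nat), l.length ≤ fuel →
      PySem.Chars.replace.go [c0] new fuel l acc
        = acc.reverse ++ l.flatMap (pvRepl c0 new) := by
  intro l
  induction l with
  | nil =>
    intro acc fuel _
    cases fuel <;> simp [PySem.Chars.replace.go]
  | cons c t ih =>
    intro acc fuel h
    cases fuel with
    | zero => simp at h
    | succ f =>
      simp only [PySem.Chars.replace.go]
      by_cases hc : c = c0
      · subst hc
        have : List.isPrefixOf [c] (c :: t) = true := by
          simp [List.isPrefixOf]
        rw [if_pos this]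
        simp only [List.length_cons] at h
        rw [show List.drop (List.length [c]) (c :: t) = t by simp]
        rw [ih (new.reverse ++ acc) f (by omega)]
        simp [pvRepl]
      · have : List.isPrefixOf [c0] (c :: t) = false := by
          simp [List.isPrefixOf]
          exact fun hh => hc hh.symm
        rw [if_neg (by simp [this])]
        simp only [List.length_cons] at h
        rw [ih (c :: acc) f (by omega)]
        simp [pvRepl, hc]

theorem replace_single (s : List Char) (c0 : Char) (new : List Char) :
    PySem.Chars.replace s [c0] new = s.flatMap (pvRepl c0 new) := by
  rw [PySem.Chars.replace]
  simp only [List.isEmpty_cons, if_false, Bool.false_eq_true]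
  exact replace_go_single c0 new s [] s.length le_rfl

-- composing the four single-character passes gives pvMapChar
theorem compose_maps (c : Char) :
    ((((pvRepl ' ' [] c).flatMap (pvRepl '[' ['[', '\''])).flatMap
        (pvRepl ',' ['\'', ',', '\''])).flatMap (pvRepl ']' ['\'', ']']))
      = pvMapChar c := by
  by_cases h1 : c = ' '
  · subst h1; rfl
  · by_cases h2 : c = '['
    · subst h2; rfl
    · by_cases h3 : c = ','
      · subst h3; rfl
      · by_cases h4 : c = ']'
        · subst h4; rfl
        · simp [pvRepl, pvMapChar, h1, h2, h3, h4]

theorem alt_toList (s : String) :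
    (string_to_dictionary_properlistformat_py_alt s).toList = s.toList.flatMap pvMapChar := by
  unfold string_to_dictionary_properlistformat_py_alt
  simp only [PySem.Str.toList_replace]
  rw [show (" " : String).toList = [' '] from rfl,
      show ("" : String).toList = [] from rfl,
      show ("[" : String).toList = ['['] from rfl,
      show ("['" : String).toList = ['[', '\''] from rfl,
      show ("," : String).toList = [','] from rfl,
      show ("','" : String).toList = ['\'', ',', '\''] from rfl,
      show ("]" : String).toList = [']'] from rfl,
      show ("']" : String).toList = ['\'', ']'] from rfl]
  rw [replace_single, replace_single, replace_single, replace_single]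
  simp only [pvFlatMap_flatMap]
  refine List.flatMap_congr (fun c _ => ?_)
  have h := compose_maps c
  simp only [pvFlatMap_flatMap] at h
  exact h

theorem a_foldl_toList (l : List Char) (out : String) :
    (l.foldl (fun output_string char =>
      if char = '[' then output_string ++ "['"
      else if char = ',' then output_string ++ "','"
      else if char = ' ' then output_string
      else if char = ']' then output_string ++ "']"
      else output_string.push char) out).toList
    = out.toList ++ l.flatMap pvMapChar := by
  induction l generalizing out with
  | nil => simp
  | cons c t ih =>
    simp only [List.foldl_cons, List.flatMap_cons]
    by_cases h1 : c = '['
    · subst h1; rw [if_pos rfl, ih]; simp [pvMapChar]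
    · by_cases h2 : c = ','
      · subst h2
        rw [if_neg h1, if_pos rfl, ih]
        simp [pvMapChar, h1]
      · by_cases h3 : c = ' '
        · subst h3
          rw [if_neg h1, if_neg h2, if_pos rfl, ih]
          simp [pvMapChar, h1, h2]
        · by_cases h4 : c = ']'
          · subst h4
            rw [if_neg h1, if_neg h2, if_neg h3, if_pos rfl, ih]
            simp [pvMapChar, h1, h2, h3]
          · rw [if_neg h1, if_neg h2, if_neg h3, if_neg h4, ih]
            simp [pvMapChar, h1, h2, h3, h4]

-- ===== VERDICT (by name: the statement is the Claim_ definition above) =====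
theorem string_to_dictionary_properlistformat_py_spec : Claim_equal_string_to_dictionary_properlistformat_py := by
  intro s _
  unfold Spec_string_to_dictionary_properlistformat_py
  apply String.toList_injective
  rw [alt_toList]
  unfold string_to_dictionary_properlistformat_py
  rw [a_foldl_toList]
  rfl
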